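-- pv_equiv track=rewrite | github.com/DivyanshiChouksey/Data-Structure-Algorithm | 384.Next Greater Element II.py | nextGreaterElements2
-- ===== SOURCE A (Python) =====
-- def nextGreaterElements2(nums):
--     res = [-1]*len(nums)
--     stack = []
--     for i in range(2):
--         for i in reversed(range(len(nums))):
--             while stack and stack[-1] <= nums[i]:
--                 stack.pop()
--             if stack and res[i]==-1:
--                 res[i] = stack[-1]
--             stack.append(nums[i])
--     return res
-- ===== SOURCE B (Python) =====
-- def nextGreaterElements2(nums):
--     n = len(nums)
--     return [next((nums[(i + k) % n] for k in range(1, n) if nums[(i + k) % n] > nums[i]), -1)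
--             for i in range(n)]
-- ===== Notes on version B (the rewrite author's own statement) =====
-- stated objective: simpler
-- what changed: Replaced the two-pass right-to-left monotonic value stack with a direct two-line comprehension that, for each index, scans the circular sequence for the first strictly greater element.
import Mathlib
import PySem

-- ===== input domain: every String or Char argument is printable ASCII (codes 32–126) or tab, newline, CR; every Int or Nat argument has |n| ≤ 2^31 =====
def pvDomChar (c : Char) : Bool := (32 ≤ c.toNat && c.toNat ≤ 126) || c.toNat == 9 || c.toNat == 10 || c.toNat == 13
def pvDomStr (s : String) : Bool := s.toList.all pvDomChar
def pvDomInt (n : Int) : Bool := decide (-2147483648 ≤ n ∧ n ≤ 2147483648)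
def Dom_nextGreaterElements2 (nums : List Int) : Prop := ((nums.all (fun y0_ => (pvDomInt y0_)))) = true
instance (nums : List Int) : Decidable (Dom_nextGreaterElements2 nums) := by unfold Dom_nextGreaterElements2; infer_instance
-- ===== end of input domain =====

-- B replaces A's two-pass right-to-left monotonic value stack by a direct per-index
-- circular scan for the first strictly greater element (objective: simpler).

-- ===== PORT A =====
-- One iteration of A's inner loop body at index i (stack kept top-at-head):
-- while stack and stack[-1] <= nums[i]: pop;  if stack and res[i]==-1: res[i]=stack[-1];  stack.append(nums[i])
def ngStep (nums : List Int) (st : List Int × List Int) (i : Nat) : List Int × List Int :=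
  let v := nums.getD i 0
  let stack' := st.2.dropWhile (fun t => decide (t ≤ v))
  let res' := match stack'.head? with
    | some top => if st.1.getD i 0 = -1 then st.1.set i top else st.1
    | none => st.1
  (res', v :: stack')

def nextGreaterElements2 (nums : List Int) : List Int :=
  let n := nums.length
  let init : List Int × List Int := (List.replicate n (-1), [])
  ((List.range 2).foldl (fun st _ => ((List.range n).reverse).foldl (ngStep nums) st) init).1

-- ===== PORT B =====
def nextGreaterElements2_alt (nums : List Int) : List Int :=
  let n := nums.length
  (List.range n).map (fun i =>
    match (List.range' 1 (n - 1)).find? (fun k => decide (nums.getD i 0 < nums.getD ((i + k) % n) 0)) with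
    | some k => nums.getD ((i + k) % n) 0
    | none => -1)

-- ===== PRECONDITION & SPEC =====
def Spec_nextGreaterElements2 (nums : List Int) (out : List Int) : Prop := out = nextGreaterElements2_alt nums
instance (nums : List Int) (out : List Int) : Decidable (Spec_nextGreaterElements2 nums out) := by unfold Spec_nextGreaterElements2; infer_instance

-- ===== CLAIM (what is proved, stated in full; the proofs are below) =====
def Claim_equal_nextGreaterElements2 : Prop := ∀ (nums : List Int), Dom_nextGreaterElements2 nums → Spec_nextGreaterElements2 nums (nextGreaterElements2 nums)

-- ===== LEMMAS AND PROOFS =====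

-- the stack A maintains after processing list p (in processing order), top at head
def stackOf (p : List Int) : List Int :=
  p.foldl (fun S a => a :: S.dropWhile (fun t => decide (t ≤ a))) []

-- res[i]-update: what A does to a cell holding c when the popped stack's head is o
def ngUpd (c : Int) (o : Option Int) : Int :=
  match o with
  | some v => if c = -1 then v else c
  | none => c

-- A's inner loop, peeled from the top index downward
def innerA (nums : List Int) : Nat → (List Int × List Int) → (List Int × List Int)
  | 0, st => st
  | (k+1), st => innerA nums k (ngStep nums st k)

theorem stackOf_append_singleton (p : List Int) (a : Int) :
    stackOf (p ++ [a]) = a :: (stackOf p).dropWhile (fun t => decide (t ≤ a)) := by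
  simp [stackOf, List.foldl_append]

theorem dropWhile_dropWhile_le {a x : Int} (h : a ≤ x) (S : List Int) :
    (S.dropWhile (fun t => decide (t ≤ a))).dropWhile (fun t => decide (t ≤ x)) =
      S.dropWhile (fun t => decide (t ≤ x)) := by
  induction S with
  | nil => rfl
  | cons b S ih =>
    by_cases hb : b ≤ a
    · simp [hb, le_trans hb h, ih]
    · simp [List.dropWhile_cons, hb]

-- the head of the popped stack is the first strictly greater element among those seen
theorem head_dropWhile_stackOf (p : List Int) (x : Int) :
    ((stackOf p).dropWhile (fun t => decide (t ≤ x))).head? =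
      p.reverse.find? (fun a => decide (x < a)) := by
  induction p using List.reverseRecOn with
  | nil => rfl
  | append_singleton p a ih =>
    rw [stackOf_append_singleton]
    by_cases hax : a ≤ x
    · rw [List.dropWhile_cons]
      simp only [decide_eq_true_eq, hax, if_true, List.reverse_append, List.reverse_singleton,
        List.singleton_append, List.find?_cons]
      have : (decide (x < a)) = false := by simp [not_lt.mpr hax]
      rw [dropWhile_dropWhile_le hax, ih, this]
    · rw [List.dropWhile_cons]
      simp only [decide_eq_true_eq, hax, if_false, List.head?_cons, List.reverse_append,
        List.reverse_singleton, List.singleton_append, List.find?_cons]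
      have : (decide (x < a)) = true := by simp [lt_of_not_ge hax]
      rw [this]

theorem foldl_reverse_range (nums : List Int) (k : Nat) (st : List Int × List Int) :
    ((List.range k).reverse).foldl (ngStep nums) st = innerA nums k st := by
  induction k generalizing st with
  | zero => rfl
  | succ k ih =>
    rw [List.range_succ, List.reverse_append, List.reverse_singleton, List.singleton_append,
      List.foldl_cons, ih]
    rfl

theorem map_getD_range (r : List Int) :
    (List.range r.length).map (fun j => r.getD j 0) = r := by
  apply List.ext_getElem
  · simp
  · intro i h1 h2
    simp [List.getD_eq_getElem?_getD, List.getElem?_eq_getElem h2]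

-- main invariant of A's inner loop
theorem getD_map_range (n j : Nat) (f : Nat → Int) (h : j < n) :
    (((List.range n).map f).getD j 0) = f j := by
  rw [List.getD_eq_getElem?_getD, List.getElem?_eq_getElem (by simpa using h)]
  simp

theorem take_drop_snoc (nums : List Int) (j k : Nat) (h1 : j < k) (h2 : k < nums.length) :
    (nums.drop (j+1)).take (k - j) =
      (nums.drop (j+1)).take (k - j - 1) ++ [nums.getD k 0] := by
  have hkj : k - j = (k - j - 1) + 1 := by omega
  rw [hkj, List.take_add_one]
  congr 1
  rw [List.getElem?_drop]
  have : j + 1 + (k - j - 1) = k := by omega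
  rw [this, List.getElem?_eq_getElem h2]
  simp [List.getD_eq_getElem?_getD, List.getElem?_eq_getElem h2]

theorem getD_set_eq (r : List Int) (k j : Nat) (v : Int) :
    (r.set k v).getD j 0 = if k = j ∧ k < r.length then v else r.getD j 0 := by
  rw [List.getD_eq_getElem?_getD, List.getElem?_set, List.getD_eq_getElem?_getD]
  by_cases h : k = j
  · subst h
    by_cases h2 : k < r.length
    · simp [h2]
    · rw [if_pos rfl, if_neg h2, if_neg (by tauto), List.getElem?_eq_none (by omega)]
  · rw [if_neg h, if_neg (by tauto)]

-- what one step of A does to the res list, given the popped stack's head o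
def applyUpd (r : List Int) (k : Nat) (o : Option Int) : List Int :=
  match o with
  | some top => if r.getD k 0 = -1 then r.set k top else r
  | none => r

theorem applyUpd_length (r : List Int) (k : Nat) (o : Option Int) :
    (applyUpd r k o).length = r.length := by
  cases o with
  | none => rfl
  | some top =>
    show (if r.getD k 0 = -1 then r.set k top else r).length = r.length
    by_cases h : r.getD k 0 = -1
    · rw [if_pos h, List.length_set]
    · rw [if_neg h]

theorem applyUpd_getD (r : List Int) (k j : Nat) (o : Option Int) (hk : k < r.length) :
    (applyUpd r k o).getD j 0 = if j = k then ngUpd (r.getD k 0) o else r.getD j 0 := by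
  cases o with
  | none =>
    show r.getD j 0 = if j = k then ngUpd (r.getD k 0) none else r.getD j 0
    by_cases hj : j = k
    · rw [if_pos hj, hj]; rfl
    · rw [if_neg hj]
  | some top =>
    show (if r.getD k 0 = -1 then r.set k top else r).getD j 0
        = if j = k then ngUpd (r.getD k 0) (some top) else r.getD j 0
    have hng : ngUpd (r.getD k 0) (some top) = if r.getD k 0 = -1 then top else r.getD k 0 := rfl
    by_cases h : r.getD k 0 = -1
    · rw [if_pos h, getD_set_eq, hng, if_pos h]
      by_cases hj : j = k
      · rw [if_pos hj, if_pos ⟨hj.symm, hk⟩]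
      · rw [if_neg hj, if_neg (by tauto)]
    · rw [if_neg h, hng, if_neg h]
      by_cases hj : j = k
      · rw [if_pos hj, hj]
      · rw [if_neg hj]

theorem innerA_spec (nums : List Int) (k : Nat) (hk : k ≤ nums.length)
    (p r : List Int) (hr : r.length = nums.length) :
    innerA nums k (r, stackOf p) =
      ((List.range nums.length).map (fun j =>
          if j < k then
            ngUpd (r.getD j 0)
              (((nums.drop (j+1)).take (k - j - 1) ++ p.reverse).find?
                (fun a => decide (nums.getD j 0 < a)))
          else r.getD j 0),
        stackOf (p ++ (nums.take k).reverse)) := by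
  induction k generalizing p r with
  | zero =>
    simp only [innerA, Nat.not_lt_zero, if_false, List.take_zero, List.reverse_nil,
      List.append_nil]
    refine Prod.ext ?_ rfl
    show r = _
    conv_lhs => rw [← map_getD_range r]
    rw [hr]
  | succ k ih =>
    have hkn : k < nums.length := by omega
    have hstep : ngStep nums (r, stackOf p) k =
        (applyUpd r k ((p.reverse).find? (fun a => decide (nums.getD k 0 < a))),
          stackOf (p ++ [nums.getD k 0])) := by
      simp only [ngStep]
      rw [head_dropWhile_stackOf, stackOf_append_singleton]
      rfl
    show innerA nums k (ngStep nums (r, stackOf p) k) = _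
    rw [hstep,
      ih (by omega) (p ++ [nums.getD k 0]) _ (by rw [applyUpd_length]; exact hr)]
    have hrk : k < r.length := by omega
    refine Prod.ext ?_ ?_
    · show List.map _ _ = List.map _ _
      apply List.map_congr_left
      intro j hj
      rw [List.mem_range] at hj
      by_cases hjk : j < k
      · have hjk1 : j < k + 1 := by omega
        simp only [hjk, hjk1, if_true]
        rw [applyUpd_getD _ _ _ _ hrk, if_neg (by omega)]
        congr 1
        have h1 : k + 1 - j - 1 = k - j := by omega
        rw [h1, take_drop_snoc nums j k hjk hkn, List.append_assoc,
          List.reverse_append, List.reverse_singleton, List.singleton_append]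
      · by_cases hjk1 : j = k
        · subst hjk1
          have h0 : j + 1 - j - 1 = 0 := by omega
          simp only [hjk, if_false, Nat.lt_succ_self, if_true, h0, List.take_zero,
            List.nil_append]
          rw [applyUpd_getD _ _ _ _ hrk, if_pos rfl]
        · have h2 : ¬ j < k + 1 := by omega
          simp only [hjk, h2, if_false]
          rw [applyUpd_getD _ _ _ _ hrk, if_neg hjk1]
    · show stackOf _ = stackOf _
      congr 1
      have hrev : (nums.take (k+1)).reverse = nums.getD k 0 :: (nums.take k).reverse := by
        rw [List.take_add_one, List.getElem?_eq_getElem hkn, List.reverse_append]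
        simp [List.getD_eq_getElem?_getD, List.getElem?_eq_getElem hkn]
      rw [hrev, List.append_assoc]
      rfl

theorem ngUpd_neg1 (o : Option Int) : ngUpd (-1) o = o.getD (-1) := by
  cases o <;> rfl

theorem ngUpd_self (v : Int) : ngUpd v (some v) = v := by
  show (if v = -1 then v else v) = v
  split_ifs <;> rfl

-- combination of A's two passes equals the circular first-greater lookup
theorem two_pass_eq (P : Int → Bool) (t d : List Int) (x : Int) (hx : P x = false) :
    ngUpd (ngUpd (-1) (d.find? P)) ((d ++ (t ++ x :: d)).find? P) =
      ((d ++ t).find? P).getD (-1) := by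
  rw [List.find?_append, List.find?_append, List.find?_append, List.find?_cons, hx]
  cases h1 : d.find? P with
  | some v =>
    rw [ngUpd_neg1]
    show ngUpd v ((some v).or _) = ((some v).or _).getD (-1)
    rw [Option.some_or, Option.some_or]
    exact ngUpd_self v
  | none =>
    rw [ngUpd_neg1]
    show ngUpd (-1) (Option.or none _) = (Option.or none _).getD (-1)
    rw [Option.none_or, Option.none_or, Option.or_none, ngUpd_neg1]

theorem getD_eq_getElem_of (l : List Int) (a : Nat) (h : a < l.length) :
    l.getD a 0 = l[a] := by
  rw [List.getD_eq_getElem?_getD, List.getElem?_eq_getElem h]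
  rfl

theorem getD_take_eq (l : List Int) (jj x : Nat) (hx : x < jj) (hl : x < l.length) :
    (l.take jj).getD x 0 = l.getD x 0 := by
  rw [getD_eq_getElem_of _ _ (by simp; omega), getD_eq_getElem_of _ _ hl, List.getElem_take]

theorem getD_drop_eq (l : List Int) (m x : Nat) (h : m + x < l.length) :
    (l.drop m).getD x 0 = l.getD (m + x) 0 := by
  rw [getD_eq_getElem_of _ _ (by simp; omega), getD_eq_getElem_of _ _ h, List.getElem_drop]

-- the circular scan list of B, unrolled
theorem rotation_eq (nums : List Int) (j : Nat) (hj : j < nums.length) :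
    (List.range' 1 (nums.length - 1)).map
        (fun k => nums.getD ((j + k) % nums.length) 0) =
      nums.drop (j+1) ++ nums.take j := by
  have hn : 0 < nums.length := by omega
  apply List.ext_getElem
  · simp; omega
  · intro i h1 h2
    rw [List.getElem_map, List.getElem_range']
    rw [List.getElem_append]
    simp only [List.length_map, List.length_range'] at h1
    have hdl : (nums.drop (j+1)).length = nums.length - j - 1 := by
      rw [List.length_drop, Nat.sub_sub]
    split
    · next hlt0 =>
      have hlt : i < nums.length - j - 1 := by rw [hdl] at hlt0; exact hlt0
      have hmod : (j + (1 + 1 * i)) % nums.length = j + 1 + i := by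
        rw [Nat.mod_eq_of_lt (by omega)]; omega
      rw [hmod, ← getD_eq_getElem_of _ _ hlt0, getD_drop_eq _ _ _ (by omega)]
    · next hge0 =>
      have hge : ¬ i < nums.length - j - 1 := by rw [hdl] at hge0; exact hge0
      have hmod : (j + (1 + 1 * i)) % nums.length = i - (nums.length - j - 1) := by
        have h3 : j + (1 + 1 * i) = (i - (nums.length - j - 1)) + nums.length := by omega
        rw [h3, Nat.add_mod_right, Nat.mod_eq_of_lt (by omega)]
      have hb : i - (List.drop (j+1) nums).length < (List.take j nums).length := by
        simp at h2 ⊢; omega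
      rw [hmod, ← getD_eq_getElem_of _ _ hb, getD_take_eq _ _ _ (by simp at h2 ⊢; omega) (by omega),
        hdl]

theorem alt_at (nums : List Int) (j : Nat) (hj : j < nums.length) :
    (match (List.range' 1 (nums.length - 1)).find?
        (fun k => decide (nums.getD j 0 < nums.getD ((j + k) % nums.length) 0)) with
     | some k => nums.getD ((j + k) % nums.length) 0
     | none => -1)
    = ((nums.drop (j+1) ++ nums.take j).find?
        (fun a => decide (nums.getD j 0 < a))).getD (-1) := by
  have hrw : (nums.drop (j+1) ++ nums.take j).find? (fun a => decide (nums.getD j 0 < a))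
      = ((List.range' 1 (nums.length - 1)).find?
          (fun k => decide (nums.getD j 0 < nums.getD ((j + k) % nums.length) 0))).map
          (fun k => nums.getD ((j + k) % nums.length) 0) := by
    rw [← rotation_eq nums j hj, List.find?_map]
    rfl
  rw [hrw]
  cases (List.range' 1 (nums.length - 1)).find?
      (fun k => decide (nums.getD j 0 < nums.getD ((j + k) % nums.length) 0)) with
  | some k => rfl
  | none => rfl

-- A's two passes, fully evaluated
theorem pass_result (nums : List Int) :
    nextGreaterElements2 nums =
      (List.range nums.length).map (fun j =>
        ngUpd (ngUpd (-1) ((nums.drop (j+1)).find? (fun a => decide (nums.getD j 0 < a))))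
          ((nums.drop (j+1) ++ nums).find? (fun a => decide (nums.getD j 0 < a)))) := by
  show (((List.range 2).foldl _ (List.replicate nums.length (-1), [])).1 : List Int) = _
  have h2 : List.range 2 = [0, 1] := rfl
  rw [h2, List.foldl_cons, List.foldl_cons, List.foldl_nil]
  rw [foldl_reverse_range, foldl_reverse_range]
  rw [show ([] : List Int) = stackOf [] from rfl]
  rw [innerA_spec nums nums.length le_rfl [] _ (List.length_replicate)]
  simp only [List.nil_append, List.take_length]
  rw [innerA_spec nums nums.length le_rfl nums.reverse _ (by simp)]
  simp only [List.reverse_reverse]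
  apply List.map_congr_left
  intro j hj
  rw [List.mem_range] at hj
  simp only [hj, if_true]
  have hd : (nums.drop (j+1)).take (nums.length - j - 1) = nums.drop (j+1) :=
    List.take_of_length_le (by simp; omega)
  rw [getD_map_range _ _ _ hj]
  simp only [hj, if_true, hd, List.append_nil, List.reverse_nil]
  congr 1
  rw [List.getD_eq_getElem?_getD, List.getElem?_eq_getElem (by simpa using hj)]
  simp [List.getD_eq_getElem?_getD]

theorem nextGreaterElements2_eq_alt (nums : List Int) :
    nextGreaterElements2 nums = nextGreaterElements2_alt nums := by
  rw [pass_result]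
  show _ = (List.range nums.length).map _
  apply List.map_congr_left
  intro j hj
  rw [List.mem_range] at hj
  rw [alt_at nums j hj]
  have hsplit : nums = nums.take j ++ nums.getD j 0 :: nums.drop (j+1) := by
    conv_lhs => rw [← List.take_append_drop j nums]
    congr 1
    rw [List.drop_eq_getElem_cons hj]
    congr 1
    rw [List.getD_eq_getElem?_getD, List.getElem?_eq_getElem hj]
    rfl
  have h := two_pass_eq (fun a => decide (nums.getD j 0 < a)) (nums.take j) (nums.drop (j+1))
    (nums.getD j 0) (decide_eq_false (lt_irrefl _))
  rw [← hsplit] at h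
  exact h

-- ===== VERDICT (by name: the statement is the Claim_ definition above) =====
theorem nextGreaterElements2_spec : Claim_equal_nextGreaterElements2 := by
  intro nums _
  exact nextGreaterElements2_eq_alt nums
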